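-- pv_equiv track=rewrite | github.com/prietopedro/leetcode-problems | 3561-resulting-string-after-adjacent-removals/3561-resulting-string-after-adjacent-removals.py | resultingString
-- ===== SOURCE A (Python) =====
-- def resultingString(s: str) -> str:
--     stack = []
--     for c in s:
--         if stack and (abs(ord(stack[-1]) - ord(c)) == 1 or abs(ord(stack[-1]) - ord(c)) == 25):
--             stack.pop()
--         else:
--             stack.append(c)
--     return ''.join(stack) if stack else ''
-- ===== SOURCE B (Python) =====
-- def resultingString(s: str) -> str:
--     # Repeatedly delete the leftmost adjacent pair whose code points differ by 1 or 25,
--     # restarting the scan from the beginning, until no such pair remains.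
--     changed = True
--     while changed:
--         changed = False
--         for i in range(len(s) - 1):
--             d = abs(ord(s[i]) - ord(s[i + 1]))
--             if d == 1 or d == 25:
--                 s = s[:i] + s[i + 2:]
--                 changed = True
--                 break
--     return s
-- ===== Notes on version B (the rewrite author's own statement) =====
-- stated objective: alternative
-- what changed: Replaced the single-pass stack reduction by a fixpoint loop that repeatedly finds and deletes the leftmost adjacent cancellable pair, restarting the scan until stable; no stack is maintained.
import Mathlib
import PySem

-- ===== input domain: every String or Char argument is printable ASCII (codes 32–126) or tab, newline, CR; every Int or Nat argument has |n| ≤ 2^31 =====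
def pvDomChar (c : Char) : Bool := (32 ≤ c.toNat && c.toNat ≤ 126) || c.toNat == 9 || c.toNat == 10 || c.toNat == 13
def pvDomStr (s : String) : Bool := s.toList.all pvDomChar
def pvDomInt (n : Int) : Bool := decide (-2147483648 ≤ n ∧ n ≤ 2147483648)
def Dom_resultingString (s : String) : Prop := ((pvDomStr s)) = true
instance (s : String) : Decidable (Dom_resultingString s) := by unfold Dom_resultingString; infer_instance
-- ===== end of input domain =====

-- B replaces A's single-pass stack by a fixpoint loop deleting the leftmost cancellable
-- adjacent pair until none remains (alternative decomposition, not faster).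

-- ===== PORT A =====
-- abs(ord(x) - ord(y)) == 1 or == 25
def cancel (x y : Char) : Bool :=
  ((x.toNat : Int) - (y.toNat : Int)).natAbs == 1 || ((x.toNat : Int) - (y.toNat : Int)).natAbs == 25

-- one step of A's loop body; stack kept head-is-top (Python's stack[-1])
def stepA (st : List Char) (c : Char) : List Char :=
  match st with
  | t :: rest => if cancel t c then rest else c :: t :: rest
  | [] => [c]

def resultingString (s : String) : String :=
  String.mk ((s.toList.foldl stepA []).reverse)

-- ===== PORT B =====
-- B's inner for-scan: find the leftmost cancellable adjacent pair and delete it (none = no pair)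
def reduceOnce : List Char → Option (List Char)
  | x :: y :: rest => if cancel x y then some rest else (reduceOnce (y :: rest)).map (x :: ·)
  | [_] => none
  | [] => none

theorem reduceOnce_length : ∀ (l l' : List Char), reduceOnce l = some l' → l'.length < l.length := by
  intro l
  induction l with
  | nil => intro l' h; simp [reduceOnce] at h
  | cons x t ih =>
    intro l' h
    match t with
    | [] => simp [reduceOnce] at h
    | y :: rest =>
      simp only [reduceOnce] at h
      split at h
      · cases h; simp
      · cases hm : reduceOnce (y :: rest) with
        | none => rw [hm] at h; simp at h
        | some m =>
          rw [hm] at h; simp at h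
          have := ih m hm
          subst h; simpa using Nat.succ_lt_succ this

-- B's outer while-changed loop: repeat until no pair remains
def reduceLoop (l : List Char) : List Char :=
  match h : reduceOnce l with
  | some l' => reduceLoop l'
  | none => l
termination_by l.length
decreasing_by exact reduceOnce_length _ _ h

def resultingString_alt (s : String) : String :=
  String.mk (reduceLoop s.toList)

-- ===== PRECONDITION & SPEC =====
def Spec_resultingString (s : String) (out : String) : Prop := out = resultingString_alt s
instance (s : String) (out : String) : Decidable (Spec_resultingString s out) := by unfold Spec_resultingString; infer_instance

-- ===== CLAIM (what is proved, stated in full; the proofs are below) =====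
def Claim_equal_resultingString : Prop := ∀ (s : String), Dom_resultingString s → Spec_resultingString s (resultingString s)

-- ===== LEMMAS AND PROOFS =====

-- a list is irreducible iff no adjacent pair cancels
def Irred (l : List Char) : Prop := List.IsChain (fun a b => cancel a b = false) l

theorem reduceOnce_none_iff : ∀ (l : List Char), reduceOnce l = none ↔ Irred l := by
  intro l
  induction l with
  | nil => simp [reduceOnce, Irred]
  | cons x t ih =>
    match t with
    | [] => simp [reduceOnce, Irred]
    | y :: rest =>
      simp only [reduceOnce, Irred, List.isChain_cons_cons]
      constructor
      · intro h
        split at h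
        · simp at h
        · rename_i hc
          cases hm : reduceOnce (y :: rest) with
          | none => exact ⟨by simpa using hc, ih.mp hm⟩
          | some m => rw [hm] at h; simp at h
      · rintro ⟨h1, h2⟩
        rw [if_neg (by simp [h1])]
        have : reduceOnce (y :: rest) = none := ih.mpr h2
        simp [this]

theorem head?_append_cons (p : List Char) (a : Char) (t : List Char) :
    (p ++ a :: t).head? = (p ++ [a]).head? := by
  cases p <;> simp

-- A's stack invariant: running the fold on an irreducible context just pushes everything
theorem foldl_irred : ∀ (l st : List Char),
    List.IsChain (fun a b => cancel a b = false) (st.reverse ++ l) →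
    l.foldl stepA st = l.reverse ++ st := by
  intro l
  induction l with
  | nil => intro st _; simp
  | cons c l' ih =>
    intro st h
    match st with
    | [] =>
      simp only [List.foldl_cons, stepA]
      have := ih [c] (by simpa using h)
      simp [this]
    | t :: r =>
      have hb : cancel t c = false := by
        have h' := (List.isChain_append.mp h).2.2
        exact h' t (by simp) c (by simp)
      simp only [List.foldl_cons]
      rw [show stepA (t :: r) c = c :: t :: r from by simp [stepA, hb]]
      have := ih (c :: t :: r) (by
        simp only [List.reverse_cons, List.append_assoc] at h ⊢
        simpa using h)
      simp [this]

-- decomposition of a successful scan: leftmost pair, irreducible prefix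
theorem reduceOnce_some_spec : ∀ (l l' : List Char), reduceOnce l = some l' →
    ∃ p x y q, l = p ++ x :: y :: q ∧ l' = p ++ q ∧ cancel x y = true ∧ Irred (p ++ [x]) := by
  intro l
  induction l with
  | nil => intro l' h; simp [reduceOnce] at h
  | cons x t ih =>
    intro l' h
    match t with
    | [] => simp [reduceOnce] at h
    | y :: rest =>
      simp only [reduceOnce] at h
      split at h
      · rename_i hc
        cases h
        exact ⟨[], x, y, l', by simp, by simp, hc,
          by simp [Irred]⟩
      · rename_i hc
        have hc' : cancel x y = false := by simpa using hc
        cases hm : reduceOnce (y :: rest) with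
        | none => rw [hm] at h; simp at h
        | some m =>
          rw [hm] at h; simp at h
          obtain ⟨p, a, b, q, he, hm', hab, hir⟩ := ih m hm
          refine ⟨x :: p, a, b, q, by simp [he], by simp [← h, hm'], hab, ?_⟩
          unfold Irred at hir ⊢
          rw [List.cons_append, List.isChain_cons]
          refine ⟨?_, hir⟩
          intro z hz
          have hy : (p ++ [a]).head? = some y := by
            rw [← head?_append_cons p a (b :: q), ← he]; rfl
          rw [hy] at hz
          cases hz
          exact hc'

theorem irred_prefix {p : List Char} {x : Char} (h : Irred (p ++ [x])) : Irred p :=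
  (List.isChain_append.mp h).1

-- deleting the leftmost cancellable pair does not change A's stack result
theorem foldl_reduceOnce : ∀ (l l' : List Char), reduceOnce l = some l' →
    l.foldl stepA [] = l'.foldl stepA [] := by
  intro l l' h
  obtain ⟨p, x, y, q, he, he', hxy, hir⟩ := reduceOnce_some_spec l l' h
  subst he he'
  have h1 : (p ++ [x]).foldl stepA [] = x :: p.reverse := by
    have := foldl_irred (p ++ [x]) [] (by simpa using hir)
    simpa using this
  have h2 : p.foldl stepA [] = p.reverse := by
    have := foldl_irred p [] (by simpa using irred_prefix hir)
    simpa using this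
  calc (p ++ x :: y :: q).foldl stepA []
      = (y :: q).foldl stepA ((p ++ [x]).foldl stepA []) := by
        rw [← List.foldl_append]; simp
    _ = q.foldl stepA p.reverse := by
        rw [h1]; simp [List.foldl_cons, stepA, hxy]
    _ = (p ++ q).foldl stepA [] := by rw [List.foldl_append, h2]

theorem foldl_eq_reduceLoop_aux : ∀ (n : Nat) (l : List Char), l.length ≤ n →
    l.foldl stepA [] = (reduceLoop l).reverse := by
  intro n
  induction n with
  | zero =>
    intro l hl
    have : l = [] := List.eq_nil_of_length_eq_zero (Nat.le_zero.mp hl)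
    subst this
    simp [reduceLoop, reduceOnce]
  | succ n ih =>
    intro l hl
    cases hm : reduceOnce l with
    | none =>
      rw [reduceLoop, hm]
      have := foldl_irred l [] (by simpa using (reduceOnce_none_iff l).mp hm)
      simpa using this
    | some l' =>
      rw [reduceLoop]
      rw [hm]
      have hlt := reduceOnce_length l l' hm
      rw [foldl_reduceOnce l l' hm]
      exact ih l' (by omega)

theorem foldl_eq_reduceLoop (l : List Char) : l.foldl stepA [] = (reduceLoop l).reverse :=
  foldl_eq_reduceLoop_aux l.length l (le_refl _)

-- ===== VERDICT (by name: the statement is the Claim_ definition above) =====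
theorem resultingString_spec : Claim_equal_resultingString := by
  intro s _
  unfold Spec_resultingString resultingString resultingString_alt
  rw [foldl_eq_reduceLoop, List.reverse_reverse]
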